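-- pv_equiv track=rewrite | github.com/Matars/gitfetch | src/gitfetch/calculations.py | calculate_current_streak
-- ===== SOURCE A (Python) =====
-- from typing import Dict, Any, List, Tuple
--
-- def calculate_current_streak(contrib_graph: List[Dict[str, Any]]) -> int:
--     """
--     Calculate the current contribution streak from contribution graph.
--
--     Args:
--         contrib_graph: List of weeks with contribution data
--
--     Returns:
--         Current streak of consecutive days with contributions
--     """
--     try:
--         all_contributions = []
--         for week in contrib_graph:
--             for day in week.get("contributionDays", []):
--                 all_contributions.append(day.get("contributionCount", 0))
--
--         all_contributions.reverse()
--         streak = 0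
--         for contrib in all_contributions:
--             if contrib > 0:
--                 streak += 1
--             else:
--                 break
--         return streak
--     except Exception:
--         return 0
-- ===== SOURCE B (Python) =====
-- def calculate_current_streak(contrib_graph):
--     streak = 0
--     for week in reversed(contrib_graph):
--         for day in reversed(week.get("contributionDays", [])):
--             if day.get("contributionCount", 0) > 0:
--                 streak += 1
--             else:
--                 return streak
--     return streak
-- ===== Notes on version B (the rewrite author's own statement) =====
-- stated objective: alternative
-- what changed: B traverses the nested weeks/days structure directly in reverse with an early return, never materializing or reversing a flattened contributions list as A does.
import Mathlib
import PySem

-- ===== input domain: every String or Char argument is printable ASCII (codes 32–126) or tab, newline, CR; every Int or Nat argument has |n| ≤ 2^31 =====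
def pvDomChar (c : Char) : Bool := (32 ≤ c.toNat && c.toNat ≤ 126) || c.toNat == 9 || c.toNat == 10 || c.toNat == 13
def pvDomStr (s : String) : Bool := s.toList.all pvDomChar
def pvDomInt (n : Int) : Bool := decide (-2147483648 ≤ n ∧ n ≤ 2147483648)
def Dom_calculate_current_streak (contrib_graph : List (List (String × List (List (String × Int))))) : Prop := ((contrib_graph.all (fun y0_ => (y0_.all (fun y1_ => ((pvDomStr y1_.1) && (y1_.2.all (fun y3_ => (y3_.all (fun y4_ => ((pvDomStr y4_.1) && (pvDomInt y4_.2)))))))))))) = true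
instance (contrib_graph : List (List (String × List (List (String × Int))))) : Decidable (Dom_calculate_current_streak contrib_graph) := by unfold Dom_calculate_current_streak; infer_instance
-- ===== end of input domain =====

-- B replaces A's build-then-reverse-then-scan over a flattened list by a direct reverse
-- traversal of the nested weeks/days structure with an early return (alternative decomposition).

-- ===== PORT A =====
-- the 'for contrib in all_contributions: if contrib > 0: streak += 1 else: break' loop
def pvStreakA : Int → List Int → Int
  | s, [] => s
  | s, c :: rest => if c > 0 then pvStreakA (s + 1) rest else s

def calculate_current_streak (contrib_graph : List (List (String × List (List (String × Int))))) : Int :=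
  -- build all_contributions by appending each day's count, week by week
  let all_contributions : List Int :=
    contrib_graph.foldl (fun acc week =>
      ((PySem.Dict.mk week).getD "contributionDays" []).foldl
        (fun acc2 day => acc2 ++ [(PySem.Dict.mk day).getD "contributionCount" 0]) acc) []
  pvStreakA 0 all_contributions.reverse

-- ===== PORT B =====
-- inner 'for day in reversed(...)': returns (streak, done) where done = early 'return streak'
def pvDaysB : Int → List (List (String × Int)) → Int × Bool
  | s, [] => (s, false)
  | s, day :: rest =>
    if (PySem.Dict.mk day).getD "contributionCount" 0 > 0 then pvDaysB (s + 1) rest else (s, true)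

def pvWeeksB : Int → List (List (String × List (List (String × Int)))) → Int
  | s, [] => s
  | s, week :: rest =>
    let p := pvDaysB s ((PySem.Dict.mk week).getD "contributionDays" []).reverse
    if p.2 then p.1 else pvWeeksB p.1 rest

def calculate_current_streak_alt (contrib_graph : List (List (String × List (List (String × Int))))) : Int :=
  pvWeeksB 0 contrib_graph.reverse

-- ===== PRECONDITION & SPEC =====
def Spec_calculate_current_streak (contrib_graph : List (List (String × List (List (String × Int))))) (out : Int) : Prop := out = calculate_current_streak_alt contrib_graph
instance (contrib_graph : List (List (String × List (List (String × Int))))) (out : Int) : Decidable (Spec_calculate_current_streak contrib_graph out) := by unfold Spec_calculate_current_streak; infer_instance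

-- ===== CLAIM (what is proved, stated in full; the proofs are below) =====
def Claim_equal_calculate_current_streak : Prop := ∀ (contrib_graph : List (List (String × List (List (String × Int))))), Dom_calculate_current_streak contrib_graph → Spec_calculate_current_streak contrib_graph (calculate_current_streak contrib_graph)

-- ===== LEMMAS AND PROOFS =====
-- proof-only abbreviations
def pvCnt (day : List (String × Int)) : Int := (PySem.Dict.mk day).getD "contributionCount" 0
def pvDays (week : List (String × List (List (String × Int)))) : List (List (String × Int)) :=
  (PySem.Dict.mk week).getD "contributionDays" []
def pvCp : List Int → Int
  | [] => 0
  | c :: rest => if c > 0 then 1 + pvCp rest else 0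

lemma pvStreakA_eq (l : List Int) : ∀ s, pvStreakA s l = s + pvCp l := by
  induction l with
  | nil => intro s; simp [pvStreakA, pvCp]
  | cons c rest ih =>
    intro s
    by_cases h : c > 0
    · simp [pvStreakA, pvCp, h, ih]; ring
    · simp [pvStreakA, pvCp, h]

lemma pvCp_append (l1 l2 : List Int) :
    pvCp (l1 ++ l2) = if l1.all (fun c => decide (c > 0)) then (l1.length : Int) + pvCp l2 else pvCp l1 := by
  induction l1 with
  | nil => simp
  | cons c rest ih =>
    by_cases h : c > 0
    · simp [pvCp, h, ih]
      split_ifs <;> ring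
    · simp [pvCp, h]

lemma pvDaysB_eq (ds : List (List (String × Int))) : ∀ s,
    pvDaysB s ds = (s + pvCp (ds.map pvCnt), !ds.all (fun d => decide (pvCnt d > 0))) := by
  induction ds with
  | nil => intro s; simp [pvDaysB, pvCp]
  | cons d rest ih =>
    intro s
    simp only [pvDaysB, List.map_cons, List.all_cons, pvCnt]
    by_cases h : (0:Int) < (PySem.Dict.mk d).getD "contributionCount" 0
    · rw [if_pos h, ih (s + 1)]
      simp [pvCp, pvCnt, h]
      ring
    · rw [if_neg h]
      simp [pvCp, h]

lemma pvCp_all_pos (l : List Int) (h : l.all (fun c => decide (c > 0)) = true) :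
    pvCp l = (l.length : Int) := by
  induction l with
  | nil => simp [pvCp]
  | cons c rest ih =>
    simp at h
    simp [pvCp, h.1, ih (by simp; exact h.2)]
    ring

lemma pvWeeksB_eq (ws : List (List (String × List (List (String × Int))))) : ∀ s,
    pvWeeksB s ws = s + pvCp (ws.flatMap (fun w => (pvDays w).reverse.map pvCnt)) := by
  induction ws with
  | nil => intro s; simp [pvWeeksB, pvCp]
  | cons w rest ih =>
    intro s
    simp only [pvWeeksB, pvDaysB_eq, List.flatMap_cons, pvCp_append, pvDays] at ih ⊢
    have hm : (((PySem.Dict.mk w).getD "contributionDays" []).reverse.map pvCnt).all (fun c => decide (c > 0))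
        = ((PySem.Dict.mk w).getD "contributionDays" []).reverse.all (fun d => decide (pvCnt d > 0)) := by
      simp [List.all_map, Function.comp_def]
    by_cases h : (((PySem.Dict.mk w).getD "contributionDays" []).reverse.all (fun d => decide (pvCnt d > 0))) = true
    · rw [hm, h]
      simp only [Bool.not_true, if_false, Bool.false_eq_true, ih]
      rw [if_pos trivial, pvCp_all_pos _ (hm.trans h)]
      simp only [List.length_map, List.length_reverse]
      ring
    · rw [hm, Bool.of_not_eq_true h]
      simp only [Bool.not_false, if_true]
      rw [if_neg (by simp)]

lemma pvAllA_eq (g : List (List (String × List (List (String × Int))))) : ∀ acc,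
    g.foldl (fun acc week =>
      ((PySem.Dict.mk week).getD "contributionDays" []).foldl
        (fun acc2 day => acc2 ++ [(PySem.Dict.mk day).getD "contributionCount" 0]) acc) acc
    = acc ++ g.flatMap (fun w => (pvDays w).map pvCnt) := by
  induction g with
  | nil => intro acc; simp
  | cons w rest ih =>
    intro acc
    simp only [List.foldl_cons, ih, List.flatMap_cons]
    rw [PySem.List.foldl_append_singleton_eq_map]
    simp [pvDays, pvCnt]

-- ===== VERDICT (by name: the statement is the Claim_ definition above) =====
theorem calculate_current_streak_spec : Claim_equal_calculate_current_streak := by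
  intro g _
  unfold Spec_calculate_current_streak calculate_current_streak calculate_current_streak_alt
  rw [pvAllA_eq, pvWeeksB_eq, pvStreakA_eq]
  simp only [List.nil_append, zero_add, List.reverse_flatMap, List.map_reverse, Function.comp_def]
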